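-- pv_equiv track=rewrite | github.com/qxzcode/aoc_2019 | 22/second.py | compose_n_times
-- ===== SOURCE A (Python) =====
-- from typing import Tuple
--
-- TOTAL_CARDS = 119315717514047
--
-- Transform = Tuple[int, int]
--
-- def compose(t1: Transform, t2: Transform) -> Transform:
--     m1, b1 = t1
--     m2, b2 = t2
--     return (m2*m1) % TOTAL_CARDS, (m2*b1 + b2) % TOTAL_CARDS  # m2*(m1*x + b1) + b2
--
-- def compose_n_times(t: Transform, n: int) -> Transform:
--     if n == 1:
--         return t
--
--     t_squared = compose(t, t)
--     if n % 2 == 0: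
--         return compose_n_times(t_squared, n // 2)
--     else:
--         return compose(t, compose_n_times(t_squared, n // 2))
-- ===== SOURCE B (Python) =====
-- TOTAL_CARDS = 119315717514047
--
--
-- def compose(t1, t2):
--     m1, b1 = t1
--     m2, b2 = t2
--     return (m2*m1) % TOTAL_CARDS, (m2*b1 + b2) % TOTAL_CARDS
--
--
-- def compose_n_times(t, n):
--     # iterative exponentiation-by-squaring with a bit accumulator
--     base = t
--     acc = None
--     while n != 1:
--         if n % 2 == 1:
--             acc = base if acc is None else compose(acc, base)
--         base = compose(base, base)
--         n //= 2
--     return base if acc is None else compose(acc, base)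
-- ===== Notes on version B (the rewrite author's own statement) =====
-- stated objective: alternative
-- what changed: Replaces A's top-down recursive square-and-multiply with an iterative bottom-up loop that squares a running base and folds the odd-bit factors into an optional accumulator; n=1 still returns t unmodified, and n<=0 (where A hits RecursionError) stays outside Pre_.
import Mathlib
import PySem

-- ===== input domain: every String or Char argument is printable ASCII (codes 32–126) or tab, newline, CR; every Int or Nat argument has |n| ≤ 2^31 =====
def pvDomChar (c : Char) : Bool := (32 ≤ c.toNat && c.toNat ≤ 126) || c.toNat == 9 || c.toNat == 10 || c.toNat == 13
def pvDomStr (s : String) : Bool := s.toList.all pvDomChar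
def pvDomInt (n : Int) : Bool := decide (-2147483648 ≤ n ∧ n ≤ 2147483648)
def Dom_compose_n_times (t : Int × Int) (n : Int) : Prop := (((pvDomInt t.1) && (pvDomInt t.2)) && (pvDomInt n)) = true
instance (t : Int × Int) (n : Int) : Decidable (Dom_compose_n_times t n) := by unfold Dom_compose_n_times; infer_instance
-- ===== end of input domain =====

-- B replaces A's top-down recursion by an iterative bottom-up square-and-multiply loop with an
-- optional accumulator (objective: alternative decomposition, same O(log n) cost).

-- ===== PORT A =====
def pvM : Int := 119315717514047

-- shared-module helper `compose` (used verbatim by both Pythons)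
def pvCompose (t1 t2 : Int × Int) : Int × Int :=
  (PySem.Int.mod (t2.1 * t1.1) pvM, PySem.Int.mod (t2.1 * t1.2 + t2.2) pvM)

-- A's recursion, with fuel n.toNat only to make it total in Lean (depth ≤ n for n ≥ 1;
-- for n ≤ 0 Python A recurses forever / hits RecursionError — excluded by Pre_)
def pvAFuel (fuel : Nat) (t : Int × Int) (n : Int) : Int × Int :=
  match fuel with
  | 0 => t
  | f + 1 =>
    if n == 1 then t
    else
      let t_squared := pvCompose t t
      if PySem.Int.mod n 2 == 0 then pvAFuel f t_squared (PySem.Int.floordiv n 2)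
      else pvCompose t (pvAFuel f t_squared (PySem.Int.floordiv n 2))

def compose_n_times (t : Int × Int) (n : Int) : Int × Int := pvAFuel n.toNat t n

-- ===== PORT B =====
-- `base if acc is None else compose(acc, base)`
def pvOptCompose (acc : Option (Int × Int)) (x : Int × Int) : Int × Int :=
  match acc with
  | none => x
  | some a => pvCompose a x

-- B's `while n != 1` loop, with fuel n.toNat only to make it total in Lean
-- (the loop runs ≤ n iterations for n ≥ 1; for n ≤ 0 Python B spins forever — excluded by Pre_)
def pvBLoop (fuel : Nat) (base : Int × Int) (acc : Option (Int × Int)) (n : Int) : Int × Int :=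
  match fuel with
  | 0 => pvOptCompose acc base
  | f + 1 =>
    if n == 1 then pvOptCompose acc base
    else
      let acc' := if PySem.Int.mod n 2 == 1 then some (pvOptCompose acc base) else acc
      pvBLoop f (pvCompose base base) acc' (PySem.Int.floordiv n 2)

def compose_n_times_alt (t : Int × Int) (n : Int) : Int × Int := pvBLoop n.toNat t none n

-- ===== PRECONDITION & SPEC =====
-- Pre_ excludes n ≤ 0, where A recurses forever (RecursionError) and B loops forever.
def Pre_compose_n_times (t : Int × Int) (n : Int) : Prop := 1 ≤ n
instance (t : Int × Int) (n : Int) : Decidable (Pre_compose_n_times t n) := by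
  unfold Pre_compose_n_times; infer_instance

def pvWitness_compose_n_times : (Int × Int) × Int := ((2, 3), 5)

def Spec_compose_n_times (t : Int × Int) (n : Int) (out : Int × Int) : Prop := out = compose_n_times_alt t n
instance (t : Int × Int) (n : Int) (out : Int × Int) : Decidable (Spec_compose_n_times t n out) := by unfold Spec_compose_n_times; infer_instance

-- ===== CLAIM (what is proved, stated in full; the proofs are below) =====
def Claim_equal_compose_n_times : Prop := ∀ (t : Int × Int) (n : Int), Dom_compose_n_times t n → Pre_compose_n_times t n → Spec_compose_n_times t n (compose_n_times t n)

-- ===== LEMMAS AND PROOFS =====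

theorem pvM_pos : (0 : Int) < pvM := by norm_num [pvM]

-- associativity of modular composition
theorem pvCompose_assoc (a b c : Int × Int) :
    pvCompose (pvCompose a b) c = pvCompose a (pvCompose b c) := by
  have e : ∀ x : Int, x % pvM ≡ x [ZMOD pvM] := fun x => Int.emod_emod_of_dvd x dvd_rfl
  simp only [pvCompose, PySem.Int.mod_eq_emod_of_pos pvM_pos]
  refine Prod.ext ?_ ?_
  · show Int.ModEq pvM (c.1 * ((b.1 * a.1) % pvM)) ((c.1 * b.1) % pvM * a.1)
    calc c.1 * ((b.1 * a.1) % pvM)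
        ≡ c.1 * (b.1 * a.1) [ZMOD pvM] := Int.ModEq.mul_left _ (e _)
      _ = c.1 * b.1 * a.1 := by ring
      _ ≡ (c.1 * b.1) % pvM * a.1 [ZMOD pvM] := (Int.ModEq.mul_right _ (e _)).symm
  · show Int.ModEq pvM (c.1 * ((b.1 * a.2 + b.2) % pvM) + c.2)
        ((c.1 * b.1) % pvM * a.2 + (c.1 * b.2 + c.2) % pvM)
    calc c.1 * ((b.1 * a.2 + b.2) % pvM) + c.2
        ≡ c.1 * (b.1 * a.2 + b.2) + c.2 [ZMOD pvM] :=
          Int.ModEq.add_right _ (Int.ModEq.mul_left _ (e _))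
      _ = c.1 * b.1 * a.2 + (c.1 * b.2 + c.2) := by ring
      _ ≡ (c.1 * b.1) % pvM * a.2 + (c.1 * b.2 + c.2) % pvM [ZMOD pvM] :=
          (Int.ModEq.add (Int.ModEq.mul_right _ (e _)) (e _)).symm

theorem pvCompose_optCompose (acc : Option (Int × Int)) (b x : Int × Int) :
    pvCompose (pvOptCompose acc b) x = pvOptCompose acc (pvCompose b x) := by
  cases acc with
  | none => rfl
  | some a => exact pvCompose_assoc a b x

-- B's loop computes acc ∘ (A's recursion), given enough fuel on both sides
theorem pvLoop_eq (k : Nat) : ∀ (n : Int) (base : Int × Int) (acc : Option (Int × Int)) (f g : Nat),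
    1 ≤ n → n.toNat = k → k ≤ f → k ≤ g →
    pvBLoop f base acc n = pvOptCompose acc (pvAFuel g base n) := by
  induction k using Nat.strong_induction_on with
  | _ k ih =>
    intro n base acc f g hn hk hf hg
    have hk1 : 1 ≤ k := by omega
    obtain ⟨f', rfl⟩ : ∃ f', f = f' + 1 := ⟨f - 1, by omega⟩
    obtain ⟨g', rfl⟩ : ∃ g', g = g' + 1 := ⟨g - 1, by omega⟩
    by_cases h1 : n = 1
    · subst h1
      simp [pvBLoop, pvAFuel]
    · have hn2 : 2 ≤ n := by omega
      have hmod : PySem.Int.mod n 2 = n % 2 := PySem.Int.mod_eq_emod_of_pos (by norm_num)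
      have hdiv : PySem.Int.floordiv n 2 = n / 2 := PySem.Int.floordiv_eq_ediv_of_pos (by norm_num)
      have hn' : 1 ≤ n / 2 := by omega
      have hk' : (n / 2).toNat < k := by omega
      have hrec := ih (n / 2).toNat hk' (n / 2) 
      by_cases hpar : n % 2 = 0
      · have hA : pvAFuel (g' + 1) base n = pvAFuel g' (pvCompose base base) (n / 2) := by
          simp [pvAFuel, h1, hpar]
        have hB : pvBLoop (f' + 1) base acc n
            = pvBLoop f' (pvCompose base base) acc (n / 2) := by
          simp [pvBLoop, h1, hpar]
        rw [hA, hB]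
        exact hrec (pvCompose base base) acc f' g' hn' rfl (by omega) (by omega)
      · have hodd : n % 2 = 1 := by omega
        have hA : pvAFuel (g' + 1) base n
            = pvCompose base (pvAFuel g' (pvCompose base base) (n / 2)) := by
          simp [pvAFuel, h1, hodd]
        have hB : pvBLoop (f' + 1) base acc n
            = pvBLoop f' (pvCompose base base) (some (pvOptCompose acc base)) (n / 2) := by
          simp [pvBLoop, h1, hodd]
        rw [hA, hB,
          hrec (pvCompose base base) (some (pvOptCompose acc base)) f' g' hn' rfl (by omega) (by omega)]
        exact (pvCompose_optCompose acc base _)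

-- ===== VERDICT (by name: the statement is the Claim_ definition above) =====
theorem compose_n_times_spec : Claim_equal_compose_n_times := by
  intro t n _ hpre
  show compose_n_times t n = compose_n_times_alt t n
  unfold compose_n_times compose_n_times_alt
  exact (pvLoop_eq n.toNat n t none n.toNat n.toNat hpre rfl le_rfl le_rfl).symm
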